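-- pv_equiv track=rewrite | github.com/tidiane-camaret/ic_segmentation | scripts/eval_iterative.py | get_slice_order
-- ===== SOURCE A (Python) =====
-- from typing import Dict, List, Optional, Tuple
--
-- def get_slice_order(n_slices: int, direction: str = "forward") -> List[int]:
--     """Get slice processing order.
--
--     Args:
--         direction: "forward" (0→N), "backward" (N→0), "center_out" (center→edges)
--     """
--     if direction == "forward":
--         return list(range(n_slices))
--     elif direction == "backward":
--         return list(range(n_slices - 1, -1, -1))
--     elif direction == "center_out":
--         center = n_slices // 2
--         order = [center]
--         for offset in range(1, n_slices):
--             if center + offset < n_slices: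
--                 order.append(center + offset)
--             if center - offset >= 0:
--                 order.append(center - offset)
--         return order
--     else:
--         raise ValueError(f"Unknown direction: {direction}")
-- ===== SOURCE B (Python) =====
-- def get_slice_order(n_slices: int, direction: str = "forward"):
--     if direction == "forward":
--         return list(range(n_slices))
--     if direction == "backward":
--         return list(range(n_slices - 1, -1, -1))
--     if direction == "center_out":
--         center = n_slices // 2
--         rest = sorted((i for i in range(n_slices) if i != center),
--                       key=lambda i: 2 * abs(i - center) + (i < center))
--         return [center] + rest
--     raise ValueError(f"Unknown direction: {direction}")
-- ===== Notes on version B (the rewrite author's own statement) =====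
-- stated objective: simpler
-- what changed: The center_out branch's incremental offset loop (append center+offset then center-offset per offset) is replaced by a single sort of the non-center indices keyed by distance from the center with the plus side first; forward/backward and the ValueError branch are unchanged.
import Mathlib
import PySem

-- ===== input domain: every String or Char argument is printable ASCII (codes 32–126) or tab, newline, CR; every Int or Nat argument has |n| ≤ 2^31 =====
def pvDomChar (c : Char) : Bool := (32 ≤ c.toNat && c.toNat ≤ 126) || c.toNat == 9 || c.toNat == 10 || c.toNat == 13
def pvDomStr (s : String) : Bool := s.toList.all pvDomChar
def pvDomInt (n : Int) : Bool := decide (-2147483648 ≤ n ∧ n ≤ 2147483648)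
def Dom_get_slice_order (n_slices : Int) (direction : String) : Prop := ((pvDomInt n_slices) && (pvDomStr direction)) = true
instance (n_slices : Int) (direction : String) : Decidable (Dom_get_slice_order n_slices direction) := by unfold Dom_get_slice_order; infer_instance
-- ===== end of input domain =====

-- B replaces the incremental offset loop of center_out by a single sort of the
-- non-center indices keyed by distance from the center (plus-side first); simpler, same cost.

-- ===== PORT A =====
def get_slice_order (n_slices : Int) (direction : String) : List Int :=
  if direction = "forward" then
    PySem.List.pyRange 0 n_slices 1
  else if direction = "backward" then
    PySem.List.pyRange (n_slices - 1) (-1) (-1)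
  else if direction = "center_out" then
    let center := PySem.Int.floordiv n_slices 2
    (PySem.List.pyRange 1 n_slices 1).foldl
      (fun order offset =>
        let order := if center + offset < n_slices then order ++ [center + offset] else order
        if center - offset ≥ 0 then order ++ [center - offset] else order)
      [center]
  else []  -- raise ValueError: excluded by Pre_get_slice_order

-- ===== PORT B =====
-- B's sort key: 2 * abs(i - center) + (i < center)
def pvKey (c i : Int) : Int := 2 * |i - c| + (if i < c then 1 else 0)

def get_slice_order_alt (n_slices : Int) (direction : String) : List Int :=
  if direction = "forward" then
    PySem.List.pyRange 0 n_slices 1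
  else if direction = "backward" then
    PySem.List.pyRange (n_slices - 1) (-1) (-1)
  else if direction = "center_out" then
    let center := PySem.Int.floordiv n_slices 2
    center :: PySem.List.sorted
      ((PySem.List.pyRange 0 n_slices 1).filter (fun i => i != center))
      (fun i => pvKey center i) false
  else []  -- raise ValueError: excluded by Pre_get_slice_order

-- ===== PRECONDITION & SPEC =====
-- Pre_ excludes exactly the unknown directions, on which A raises ValueError.
def Pre_get_slice_order (n_slices : Int) (direction : String) : Prop :=
  direction = "forward" ∨ direction = "backward" ∨ direction = "center_out"
instance (n_slices : Int) (direction : String) : Decidable (Pre_get_slice_order n_slices direction) := by unfold Pre_get_slice_order; infer_instance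

def pvWitness_get_slice_order : Int × String := (5, "center_out")

def Spec_get_slice_order (n_slices : Int) (direction : String) (out : List Int) : Prop := out = get_slice_order_alt n_slices direction
instance (n_slices : Int) (direction : String) (out : List Int) : Decidable (Spec_get_slice_order n_slices direction out) := by unfold Spec_get_slice_order; infer_instance

-- ===== CLAIM (what is proved, stated in full; the proofs are below) =====
def Claim_equal_get_slice_order : Prop := ∀ (n_slices : Int) (direction : String), Dom_get_slice_order n_slices direction → Pre_get_slice_order n_slices direction → Spec_get_slice_order n_slices direction (get_slice_order n_slices direction)

-- ===== LEMMAS AND PROOFS =====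

-- the (at most two) elements A appends at a given offset
def pvChunk (c n d : Int) : List Int :=
  (if c + d < n then [c + d] else []) ++ (if 0 ≤ c - d then [c - d] else [])

lemma pvKey_plus (c d : Int) (hd : 0 < d) : pvKey c (c + d) = 2 * d := by
  unfold pvKey
  rw [if_neg (by omega), show c + d - c = d by ring, abs_of_pos hd]; ring

lemma pvKey_minus (c d : Int) (hd : 0 < d) : pvKey c (c - d) = 2 * d + 1 := by
  unfold pvKey
  rw [if_pos (by omega), show c - d - c = -d by ring, abs_neg, abs_of_pos hd]

lemma mem_pvChunk {c n d x : Int} :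
    x ∈ pvChunk c n d ↔ (c + d < n ∧ x = c + d) ∨ (0 ≤ c - d ∧ x = c - d) := by
  unfold pvChunk
  split_ifs <;> simp_all

lemma pvKey_bounds {c n d x : Int} (hd : 0 < d) (hx : x ∈ pvChunk c n d) :
    2 * d ≤ pvKey c x ∧ pvKey c x ≤ 2 * d + 1 := by
  rcases mem_pvChunk.mp hx with ⟨_, rfl⟩ | ⟨_, rfl⟩
  · rw [pvKey_plus c d hd]; omega
  · rw [pvKey_minus c d hd]; omega

lemma pvChunk_pairwise {c n d : Int} (hd : 0 < d) :
    (pvChunk c n d).Pairwise (fun a b => pvKey c a < pvKey c b) := by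
  unfold pvChunk
  split_ifs <;> simp <;> rw [pvKey_plus c d hd, pvKey_minus c d hd] <;> omega

lemma pvFlat_pairwise (c n : Int) :
    ((PySem.List.pyRange 1 n 1).flatMap (pvChunk c n)).Pairwise
      (fun a b => pvKey c a < pvKey c b) := by
  rw [List.flatMap_def, List.pairwise_flatten]
  constructor
  · intro l hl
    rcases List.mem_map.mp hl with ⟨d, hd, rfl⟩
    exact pvChunk_pairwise (by have := PySem.List.mem_pyRange_one.mp hd; omega)
  · rw [List.pairwise_map]
    refine (PySem.List.pairwise_lt_pyRange_one 1 n).imp_of_mem ?_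
    intro d₁ d₂ h1 h2 hlt x hx y hy
    have b1 := pvKey_bounds (by have := PySem.List.mem_pyRange_one.mp h1; omega) hx
    have b2 := pvKey_bounds (by have := PySem.List.mem_pyRange_one.mp h2; omega) hy
    omega

lemma pvFlat_perm (n : Int) :
    ((PySem.List.pyRange 1 n 1).flatMap (pvChunk (PySem.Int.floordiv n 2) n)).Perm
      ((PySem.List.pyRange 0 n 1).filter (fun i => i != PySem.Int.floordiv n 2)) := by
  set c := PySem.Int.floordiv n 2 with hc
  have hcb : c * 2 ≤ n ∧ n < (c + 1) * 2 :=
    (PySem.Int.floordiv_eq_iff_of_pos (by norm_num)).mp hc.symm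
  rw [List.perm_ext_iff_of_nodup]
  · intro x
    simp only [List.mem_flatMap, List.mem_filter, PySem.List.mem_pyRange_one, mem_pvChunk,
      bne_iff_ne, ne_eq]
    constructor
    · rintro ⟨d, ⟨hd1, hdn⟩, ⟨h, rfl⟩ | ⟨h, rfl⟩⟩ <;> constructor <;> omega
    · rintro ⟨⟨hx0, hxn⟩, hxc⟩
      rcases lt_or_gt_of_ne hxc with h | h
      · exact ⟨c - x, by omega, Or.inr ⟨by omega, by ring⟩⟩
      · exact ⟨x - c, by omega, Or.inl ⟨by omega, by ring⟩⟩
  · exact (pvFlat_pairwise c n).imp (by intro a b h heq; subst heq; omega)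
  · exact (PySem.List.nodup_pyRange_one 0 n).filter _

lemma center_out_eq (n : Int) :
    get_slice_order n "center_out" = get_slice_order_alt n "center_out" := by
  unfold get_slice_order get_slice_order_alt
  simp only [String.reduceEq, reduceIte]
  have hbody : (fun (order : List Int) (offset : Int) =>
      if PySem.Int.floordiv n 2 - offset ≥ 0 then
        (if PySem.Int.floordiv n 2 + offset < n then order ++ [PySem.Int.floordiv n 2 + offset]
         else order) ++ [PySem.Int.floordiv n 2 - offset]
      else if PySem.Int.floordiv n 2 + offset < n then order ++ [PySem.Int.floordiv n 2 + offset]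
      else order) = fun order offset => order ++ pvChunk (PySem.Int.floordiv n 2) n offset := by
    funext order offset
    unfold pvChunk
    split_ifs <;> simp
  rw [hbody, PySem.List.foldl_append_eq_flatMap]
  exact (congrArg (fun l => PySem.Int.floordiv n 2 :: l)
    (PySem.List.sorted_eq_of_perm_of_pairwise_lt _ _ (fun i => pvKey (PySem.Int.floordiv n 2) i)
      (pvFlat_perm n) (pvFlat_pairwise (PySem.Int.floordiv n 2) n))).symm

-- ===== VERDICT (by name: the statement is the Claim_ definition above) =====
theorem get_slice_order_spec : Claim_equal_get_slice_order := by
  intro n dir _ hpre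
  unfold Spec_get_slice_order
  rcases hpre with rfl | rfl | rfl
  · rfl
  · rfl
  · exact center_out_eq n
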